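-- pv_equiv track=rewrite | github.com/SeungminKimdev/study-code | 프로그래머스/0/120886. A로 B 만들기/A로 B 만들기.py | solution
-- ===== SOURCE A (Python) =====
-- def solution(before, after):
--     words = {}
--     for i in before:
--         if i in words:
--             words[i] += 1
--         else:
--             words[i] = 1
--     for i in after:
--         if i in words:
--             if words[i] == 0:
--                 return 0
--             words[i] -= 1
--         else:
--             return 0
--     return 1
-- ===== SOURCE B (Python) =====
-- def solution(before, after):
--     cb = {}
--     for c in before:
--         cb[c] = cb.get(c, 0) + 1
--     ca = {}
--     for c in after:
--         ca[c] = ca.get(c, 0) + 1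
--     return 1 if all(ca[c] <= cb.get(c, 0) for c in ca) else 0
-- ===== Notes on version B (the rewrite author's own statement) =====
-- stated objective: alternative
-- what changed: B builds frequency tables for both strings once and checks multiset containment with a single all() over after's distinct characters, instead of A's destructive consume-and-early-return scan of after against a mutated counter.
import Mathlib
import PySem

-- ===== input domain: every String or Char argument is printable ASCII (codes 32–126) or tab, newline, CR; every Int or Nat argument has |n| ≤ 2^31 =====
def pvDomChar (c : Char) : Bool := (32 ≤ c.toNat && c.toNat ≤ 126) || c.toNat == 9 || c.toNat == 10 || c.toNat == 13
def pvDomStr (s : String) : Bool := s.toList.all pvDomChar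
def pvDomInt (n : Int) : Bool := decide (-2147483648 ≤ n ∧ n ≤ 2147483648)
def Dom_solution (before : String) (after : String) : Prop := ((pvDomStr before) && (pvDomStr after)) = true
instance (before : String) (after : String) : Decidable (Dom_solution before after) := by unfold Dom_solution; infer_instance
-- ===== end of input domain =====

-- B replaces A's destructive consume-and-early-return scan with two frequency tables and one containment check (alternative decomposition, same cost).


-- ===== PORT A =====
-- second loop of A: consume characters of `after` from the dict, early-return 0
def solutionGo (words : PySem.Dict Char Int) : List Char → Int
  | [] => 1
  | i :: rest =>
      if words.contains i then
        if words.getD i 0 = 0 then 0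
        else solutionGo (words.modify i 0 (· - 1)) rest
      else 0

def solution (before : String) (after : String) : Int :=
  let words := before.toList.foldl
    (fun d i => if d.contains i then d.modify i 0 (· + 1) else d.insert i 1)
    PySem.Dict.empty
  solutionGo words after.toList

-- ===== PORT B =====
def solution_alt (before : String) (after : String) : Int :=
  let cb : PySem.Dict Char Int := before.toList.foldl (fun d c => d.insert c (d.getD c 0 + 1)) PySem.Dict.empty
  let ca : PySem.Dict Char Int := after.toList.foldl (fun d c => d.insert c (d.getD c 0 + 1)) PySem.Dict.empty
  -- ca[c] in Python: c is a key of ca, so ca[c] = ca.get(c, 0)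
  if ca.keys.all (fun c => ca.getD c 0 ≤ cb.getD c 0) then 1 else 0

-- ===== PRECONDITION & SPEC =====
def Spec_solution (before : String) (after : String) (out : Int) : Prop := out = solution_alt before after
instance (before : String) (after : String) (out : Int) : Decidable (Spec_solution before after out) := by unfold Spec_solution; infer_instance

-- ===== CLAIM (what is proved, stated in full; the proofs are below) =====
def Claim_equal_solution : Prop := ∀ (before : String) (after : String), Dom_solution before after → Spec_solution before after (solution before after)

-- ===== LEMMAS AND PROOFS =====

-- A's first loop is the standard counter loop
lemma solution_build_eq (l : List Char) (d : PySem.Dict Char Int) :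
    l.foldl (fun d i => if d.contains i then d.modify i 0 (· + 1) else d.insert i 1) d
    = l.foldl (fun d c => d.insert c (d.getD c 0 + 1)) d := by
  induction l generalizing d with
  | nil => rfl
  | cons c rest ih =>
    simp only [List.foldl_cons, ih]
    congr 1
    by_cases h : d.contains c = true
    · simp [h, PySem.Dict.modify]
    · rw [if_neg h, PySem.Dict.getD_of_not_contains d 0 (by simpa using h)]
      norm_num

lemma solutionGo_eq (l : List Char) (d : PySem.Dict Char Int)
    (h0 : ∀ x, 0 ≤ d.getD x 0) :
    solutionGo d l = if ∀ x, (l.count x : Int) ≤ d.getD x 0 then 1 else 0 := by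
  induction l generalizing d with
  | nil => simp [solutionGo, h0]
  | cons c rest ih =>
    by_cases hc : d.contains c = true
    · by_cases hz : d.getD c 0 = 0
      · have : ¬ ∀ x, (((c :: rest).count x : Int)) ≤ d.getD x 0 := by
          intro h
          have := h c
          rw [List.count_cons] at this
          simp [hz] at this
          omega
        simp [solutionGo, hc, hz, this]
      · have h0' : ∀ x, 0 ≤ (d.modify c 0 (· - 1)).getD x 0 := by
          intro x
          rw [PySem.Dict.getD_modify]
          split
          · have := h0 c; omega
          · exact h0 x
        have hpt : ∀ x, (((rest.count x : Int)) ≤ (d.modify c 0 (· - 1)).getD x 0)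
            ↔ (((c :: rest).count x : Int) ≤ d.getD x 0) := by
          intro x
          rw [PySem.Dict.getD_modify, List.count_cons]
          have h0c := h0 c
          by_cases hx : x = c
          · simp only [hx]
            simp only [beq_self_eq_true, if_true]
            push_cast
            omega
          · simp only [if_neg hx, if_neg (fun h : c = x => hx h.symm), beq_iff_eq]
            push_cast
            omega
        simp only [solutionGo, hc, if_true, hz, if_false, ih _ h0']
        rw [if_congr (forall_congr' hpt) rfl rfl]
    · have hd : d.getD c 0 = 0 :=
        PySem.Dict.getD_of_not_contains _ 0 (by simpa using hc)
      have : ¬ ∀ x, (((c :: rest).count x : Int)) ≤ d.getD x 0 := by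
        intro h
        have := h c
        rw [List.count_cons] at this
        simp [hd] at this
        omega
      simp [solutionGo, hc, this]

lemma counter_getD (l : List Char) (x : Char) :
    (l.foldl (fun d c => d.insert c (d.getD c 0 + 1)) (PySem.Dict.empty : PySem.Dict Char Int)).getD x 0
      = (l.count x : Int) := by
  rw [PySem.Dict.getD_foldl_insert_add_one]
  simp

lemma alt_cond_iff (before after : String) :
    ((after.toList.foldl (fun d c => d.insert c (d.getD c 0 + 1)) (PySem.Dict.empty : PySem.Dict Char Int)).keys.all
      (fun c => (after.toList.count c : Int) ≤ (before.toList.count c : Int))) = true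
    ↔ (∀ x, (after.toList.count x : Int) ≤ (before.toList.count x : Int)) := by
  have hk : (after.toList.foldl (fun d c => d.insert c (d.getD c 0 + 1)) (PySem.Dict.empty : PySem.Dict Char Int)).keys
      = PySem.Set.ofList after.toList := by
    rw [PySem.Dict.foldl_insert_getD_add_one_eq_counter, PySem.Dict.keys_counter]
  rw [hk]
  simp only [List.all_eq_true, decide_eq_true_eq, PySem.Set.mem_ofList]
  constructor
  · intro h x
    by_cases hx : x ∈ after.toList
    · exact h x hx
    · rw [List.count_eq_zero_of_not_mem hx]
      positivity
  · intro h x _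
    exact h x

theorem solution_eq_alt (before after : String) :
    solution before after = solution_alt before after := by
  simp only [solution, solution_alt]
  rw [solution_build_eq]
  rw [solutionGo_eq _ _ (fun x => by rw [counter_getD]; positivity)]
  simp only [counter_getD]
  have hiff := alt_cond_iff before after
  by_cases hall : ∀ x : Char, (after.toList.count x : Int) ≤ (before.toList.count x : Int)
  · rw [if_pos hall, if_pos (hiff.mpr hall)]
  · rw [if_neg hall, if_neg (fun h => hall (hiff.mp h))]

-- ===== VERDICT (by name: the statement is the Claim_ definition above) =====
theorem solution_spec : Claim_equal_solution := by
  intro before after _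
  unfold Spec_solution
  exact solution_eq_alt before after
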